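-- pv_equiv track=rewrite | github.com/panditsa/wave | wave_lang/kernel/wave/scheduling/loop_reconstruction_utils.py | create_extended_drain_stage_schedule
-- ===== SOURCE A (Python) =====
-- from typing import Optional, Sequence
--
-- def create_drain_stage_schedule(n: int) -> list[list[int]]:
--     """
--     Create the schedule of which stages need to be interleaved for the epilogue (drain).
--     This looks like:
--     [None    3    2 1]
--     [None None    3 2]
--     [None None None 3]
--     """
--     schedule = []
--     for i in range(n - 1):
--         row = [None] * (i + 1)
--         row.extend(range(n - 1, i, -1))
--         schedule.append(row)
--     return schedule
--
-- def create_extended_drain_stage_schedule(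
--     num_stages: int, max_extra_depth: int
-- ) -> list[list[Optional[int]]]:
--     """
--     Create an extended drain schedule that accounts for deeply-prefetched nodes.
--
--     With max_extra_depth > 0, extra drain iterations are needed because
--     non-deeply-prefetched stage-0 nodes haven't completed their last iterations
--     (they were only 1 iteration ahead, while the kernel ran fewer iterations
--     due to extra prologue fills).
--
--     For num_stages=2, max_extra_depth=1, the schedule is:
--         [None, 1, 0]     -> compute at iter 1, non-deep prefetch at iter 2
--         [None, None, 1]   -> compute at iter 2
--
--     This is derived from create_drain_stage_schedule(num_stages + max_extra_depth)
--     with virtual stage indices remapped to real stage indices: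
--         virtual_stage -> real_stage = max(0, virtual_stage - max_extra_depth)
--
--     Args:
--         num_stages: Number of real pipeline stages (e.g., 2).
--         max_extra_depth: Extra depth from deeply-prefetched nodes (e.g., 1).
--
--     Returns:
--         Extended drain schedule with (num_stages - 1 + max_extra_depth) rows.
--     """
--     if max_extra_depth == 0:
--         return create_drain_stage_schedule(num_stages)
--
--     effective_stages = num_stages + max_extra_depth
--     virtual_schedule = create_drain_stage_schedule(effective_stages)
--
--     # Remap virtual stage indices to real stage indices.
--     # Virtual stages [0, max_extra_depth) map to real stage 0.
--     # Virtual stages [max_extra_depth, effective_stages) map to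
--     # real stages [0, num_stages).
--     remapped_schedule = []
--     for row in virtual_schedule:
--         remapped_row = []
--         for entry in row:
--             if entry is None:
--                 remapped_row.append(None)
--             else:
--                 real_stage = max(0, entry - max_extra_depth)
--                 remapped_row.append(real_stage)
--         remapped_schedule.append(remapped_row)
--
--     return remapped_schedule
-- ===== SOURCE B (Python) =====
-- def create_extended_drain_stage_schedule(num_stages, max_extra_depth):
--     # Shift-based construction: build only the first row explicitly, then derive
--     # each subsequent row from the previous one by shifting it right (prepend a
--     # None, drop the last entry) -- the triangular schedule is shift-invariant.
--     n = num_stages + max_extra_depth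
--     if n < 2:
--         return []
--     row = [None] + [max(0, s - max_extra_depth) for s in range(n - 1, 0, -1)]
--     schedule = [row]
--     for _ in range(n - 2):
--         row = [None] + row[:-1]
--         schedule.append(row)
--     return schedule
-- ===== Notes on version B (the rewrite author's own statement) =====
-- stated objective: alternative
-- what changed: B never materializes the virtual schedule or remaps cells: it computes only the first row explicitly and derives each following row from the previous one by a shift (prepend None, drop the last entry), exploiting the shift-invariance of the triangular drain schedule; the max_extra_depth==0 special case disappears.
import Mathlib
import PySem

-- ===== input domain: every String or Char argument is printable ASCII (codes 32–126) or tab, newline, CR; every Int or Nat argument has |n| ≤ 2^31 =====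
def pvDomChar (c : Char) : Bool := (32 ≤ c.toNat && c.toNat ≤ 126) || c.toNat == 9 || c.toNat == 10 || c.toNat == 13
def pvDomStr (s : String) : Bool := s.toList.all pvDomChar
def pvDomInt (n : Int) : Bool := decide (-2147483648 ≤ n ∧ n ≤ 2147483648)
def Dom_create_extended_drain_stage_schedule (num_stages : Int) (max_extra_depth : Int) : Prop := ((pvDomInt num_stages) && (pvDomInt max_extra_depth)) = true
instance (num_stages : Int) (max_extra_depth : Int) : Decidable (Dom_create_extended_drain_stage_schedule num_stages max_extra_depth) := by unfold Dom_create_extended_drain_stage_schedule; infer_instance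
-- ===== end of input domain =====

-- B builds only the first row and derives each next row by shifting the previous one (no virtual schedule, no remap pass, no max_extra_depth==0 case); objective: alternative.


-- ===== PORT A =====
def create_drain_stage_schedule (n : Int) : List (List (Option Int)) :=
  (PySem.List.pyRange 0 (n - 1) 1).foldl
    (fun schedule i =>
      let row : List (Option Int) := PySem.List.pyRepeat [(none : Option Int)] (i + 1)
      let row := row ++ (PySem.List.pyRange (n - 1) i (-1)).map (fun s => some s)
      schedule ++ [row])
    []

def create_extended_drain_stage_schedule (num_stages : Int) (max_extra_depth : Int) : List (List (Option Int)) :=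
  if max_extra_depth = 0 then
    create_drain_stage_schedule num_stages
  else
    let effective_stages := num_stages + max_extra_depth
    let virtual_schedule := create_drain_stage_schedule effective_stages
    virtual_schedule.foldl
      (fun remapped_schedule row =>
        let remapped_row := row.foldl
          (fun remapped_row entry =>
            match entry with
            | none => remapped_row ++ [(none : Option Int)]
            | some e => remapped_row ++ [some (max 0 (e - max_extra_depth))])
          []
        remapped_schedule ++ [remapped_row])
      []

-- ===== PORT B =====
def create_extended_drain_stage_schedule_alt (num_stages : Int) (max_extra_depth : Int) : List (List (Option Int)) :=
  let n := num_stages + max_extra_depth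
  if n < 2 then []
  else
    let row0 : List (Option Int) :=
      (none : Option Int) :: (PySem.List.pyRange (n - 1) 0 (-1)).map
        (fun s => some (max 0 (s - max_extra_depth)))
    ((PySem.List.pyRange 0 (n - 2) 1).foldl
      (fun (p : List (List (Option Int)) × List (Option Int)) _ =>
        let row := (none : Option Int) :: p.2.dropLast
        (p.1 ++ [row], row))
      ([row0], row0)).1

-- ===== PRECONDITION & SPEC =====
def Spec_create_extended_drain_stage_schedule (num_stages : Int) (max_extra_depth : Int) (out : List (List (Option Int))) : Prop := out = create_extended_drain_stage_schedule_alt num_stages max_extra_depth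
instance (num_stages : Int) (max_extra_depth : Int) (out : List (List (Option Int))) : Decidable (Spec_create_extended_drain_stage_schedule num_stages max_extra_depth out) := by unfold Spec_create_extended_drain_stage_schedule; infer_instance

-- ===== CLAIM =====
def Claim_equal_create_extended_drain_stage_schedule : Prop := ∀ (num_stages : Int) (max_extra_depth : Int), Dom_create_extended_drain_stage_schedule num_stages max_extra_depth → Spec_create_extended_drain_stage_schedule num_stages max_extra_depth (create_extended_drain_stage_schedule num_stages max_extra_depth)

-- ===== LEMMAS AND PROOFS =====

-- The closed-form row: i+1 Nones, then the clamped countdown.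
def pvRowFun (n m i : Int) : List (Option Int) :=
  List.replicate (i + 1).toNat (none : Option Int)
    ++ (PySem.List.pyRange (n - 1) i (-1)).map (fun s => some (max 0 (s - m)))

def pvRemapCell (m : Int) : Option Int → Option Int
  | none => none
  | some e => some (max 0 (e - m))

-- A's helper as a map over the row index
theorem drain_eq_map (n : Int) :
    create_drain_stage_schedule n =
      (PySem.List.pyRange 0 (n - 1) 1).map (fun i =>
        List.replicate (i + 1).toNat (none : Option Int)
          ++ (PySem.List.pyRange (n - 1) i (-1)).map (fun s => some s)) := by
  unfold create_drain_stage_schedule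
  rw [PySem.List.foldl_append_singleton_eq_map]
  simp [PySem.List.pyRepeat_singleton]

theorem remap_row_eq_map (m : Int) (row : List (Option Int)) :
    row.foldl
      (fun remapped_row entry =>
        match entry with
        | none => remapped_row ++ [(none : Option Int)]
        | some e => remapped_row ++ [some (max 0 (e - m))])
      [] = row.map (pvRemapCell m) := by
  have h : (fun (remapped_row : List (Option Int)) (entry : Option Int) =>
      match entry with
      | none => remapped_row ++ [(none : Option Int)]
      | some e => remapped_row ++ [some (max 0 (e - m))])
      = fun remapped_row entry => remapped_row ++ [pvRemapCell m entry] := by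
    funext acc entry; cases entry <;> rfl
  rw [h, PySem.List.foldl_append_singleton_eq_map]
  simp

-- A equals the closed-form row table.
theorem portA_eq_rowFun (ns m : Int) :
    create_extended_drain_stage_schedule ns m =
      (PySem.List.pyRange 0 (ns + m - 1) 1).map (pvRowFun (ns + m) m) := by
  unfold create_extended_drain_stage_schedule
  by_cases hm : m = 0
  · subst hm
    simp only [drain_eq_map, add_zero]
    apply List.map_congr_left
    intro i hi
    have hi0 : 0 ≤ i := (PySem.List.mem_pyRange_one.mp hi).1
    unfold pvRowFun
    congr 1
    apply List.map_congr_left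
    intro s hs
    have hs' : i < s := (PySem.List.mem_pyRange_neg_one.mp hs).1
    have : max 0 (s - 0) = s := by omega
    rw [this]
  · simp only [if_neg hm, drain_eq_map]
    have h : ∀ (acc : List (List (Option Int))) (l : List (List (Option Int))),
        l.foldl (fun remapped_schedule row =>
          remapped_schedule ++ [row.foldl
            (fun remapped_row entry =>
              match entry with
              | none => remapped_row ++ [(none : Option Int)]
              | some e => remapped_row ++ [some (max 0 (e - m))]) []]) acc
        = acc ++ l.map (fun row => row.map (pvRemapCell m)) := by
      intro acc l
      have hf : (fun (remapped_schedule : List (List (Option Int))) (row : List (Option Int)) =>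
          remapped_schedule ++ [row.foldl
            (fun remapped_row entry =>
              match entry with
              | none => remapped_row ++ [(none : Option Int)]
              | some e => remapped_row ++ [some (max 0 (e - m))]) []])
          = fun remapped_schedule row => remapped_schedule ++ [row.map (pvRemapCell m)] := by
        funext acc' row; rw [remap_row_eq_map]
      rw [hf, PySem.List.foldl_append_singleton_eq_map]
    rw [h]
    simp only [List.nil_append, List.map_map]
    apply List.map_congr_left
    intro i _
    simp only [Function.comp, List.map_append, List.map_map]
    simp [pvRemapCell, pvRowFun]

-- Shift invariance: the next row is the previous one shifted right by one.
theorem rowFun_shift (n m i : Int) (h0 : 0 ≤ i) (h1 : i < n - 1) :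
    pvRowFun n m (i + 1) = (none : Option Int) :: (pvRowFun n m i).dropLast := by
  unfold pvRowFun
  have hne : (PySem.List.pyRange (n - 1) i (-1)).map
      (fun s => some (max 0 (s - m))) ≠ [] := by
    rw [PySem.List.pyRange_neg_one_cons h1]; simp
  rw [List.dropLast_append_of_ne_nil hne, ← List.map_dropLast]
  have hdrop : (PySem.List.pyRange (n - 1) i (-1)).dropLast
      = PySem.List.pyRange (n - 1) (i + 1) (-1) := by
    rw [PySem.List.pyRange_neg_one_eq_reverse, PySem.List.pyRange_neg_one_eq_reverse,
        List.dropLast_reverse]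
    congr 1
    have h : i + 1 < (n - 1) + 1 := by omega
    rw [PySem.List.pyRange_one_cons h]
    simp
  rw [hdrop]
  have ht : ((i + 1 + 1).toNat) = (i + 1).toNat + 1 := by omega
  rw [ht, List.replicate_succ]
  simp

-- A foldl whose body ignores the element is an iterate.
theorem foldl_ignore {α β : Type} (f : α → α) (l : List β) (s : α) :
    l.foldl (fun a _ => f a) s = f^[l.length] s := by
  induction l generalizing s with
  | nil => rfl
  | cons x xs ih => simp [List.foldl_cons, ih, Function.iterate_succ_apply]

-- The shift step of B.
def pvStep : List (List (Option Int)) × List (Option Int) →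
    List (List (Option Int)) × List (Option Int) :=
  fun p =>
    let row := (none : Option Int) :: p.2.dropLast
    (p.1 ++ [row], row)

-- Iterating the shift step builds the row table.
theorem iterate_step (n m : Int) (hn : 2 ≤ n) :
    ∀ (j : Nat), j ≤ (n - 2).toNat →
      pvStep^[j] ([pvRowFun n m 0], pvRowFun n m 0)
        = ((PySem.List.pyRange 0 ((j : Int) + 1) 1).map (pvRowFun n m), pvRowFun n m (j : Int)) := by
  intro j
  induction j with
  | zero => intro _; simp [PySem.List.pyRange_one, List.range_succ]
  | succ j ih =>
    intro hj
    have hj' : j ≤ (n - 2).toNat := by omega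
    rw [Function.iterate_succ_apply', ih hj']
    have hsh : pvRowFun n m ((j : Int) + 1)
        = (none : Option Int) :: (pvRowFun n m (j : Int)).dropLast := by
      apply rowFun_shift n m _ (by positivity)
      omega
    unfold pvStep
    simp only [← hsh]
    rw [Prod.mk.injEq]
    constructor
    · have hr : PySem.List.pyRange 0 (((j : Int) + 1) + 1) 1
          = PySem.List.pyRange 0 ((j : Int) + 1) 1 ++ [(j : Int) + 1] := by
        exact PySem.List.pyRange_one_succ_right (by positivity)
      have hc : ((j + 1 : Nat) : Int) + 1 = ((j : Int) + 1) + 1 := by push_cast; ring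
      rw [hc, hr]
      simp
    · push_cast; ring_nf

-- B equals the closed-form row table.
theorem portB_eq_rowFun (ns m : Int) :
    create_extended_drain_stage_schedule_alt ns m =
      (PySem.List.pyRange 0 (ns + m - 1) 1).map (pvRowFun (ns + m) m) := by
  by_cases h2 : ns + m < 2
  · unfold create_extended_drain_stage_schedule_alt
    rw [if_pos h2, PySem.List.pyRange_one_eq_nil (by omega)]
    simp
  · have h2' : 2 ≤ ns + m := by omega
    have hrow0 : ((none : Option Int) :: (PySem.List.pyRange (ns + m - 1) 0 (-1)).map
        (fun s => some (max 0 (s - m)))) = pvRowFun (ns + m) m 0 := by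
      unfold pvRowFun; norm_num
    unfold create_extended_drain_stage_schedule_alt
    rw [if_neg h2]
    show (List.foldl (fun p (_ : Int) => pvStep p)
        ([(none : Option Int) :: (PySem.List.pyRange (ns + m - 1) 0 (-1)).map
            (fun s => some (max 0 (s - m))),],
          (none : Option Int) :: (PySem.List.pyRange (ns + m - 1) 0 (-1)).map
            (fun s => some (max 0 (s - m))))
        (PySem.List.pyRange 0 (ns + m - 2) 1)).1 = _
    rw [hrow0, foldl_ignore pvStep, PySem.List.length_pyRange_one,
        iterate_step (ns + m) m h2' ((ns + m - 2 - 0).toNat) (by omega)]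
    have hc : (((ns + m - 2 - 0).toNat : Int)) + 1 = ns + m - 1 := by omega
    rw [hc]

-- ===== VERDICT =====
theorem create_extended_drain_stage_schedule_spec :
    Claim_equal_create_extended_drain_stage_schedule := by
  intro ns m _
  unfold Spec_create_extended_drain_stage_schedule
  rw [portA_eq_rowFun, portB_eq_rowFun]
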